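-- pv_equiv track=rewrite | github.com/Michaellee955/algorithms | hw_4/least_distance.py | brutal_distance
-- ===== SOURCE A (Python) =====
-- def brutal_distance(A,B):
--     i = len(A)
--     j = len(B)
--
--     result = []
--     dist_opt = float("inf")
--     for a in range(j):
--         for b in range(j):
--             for c in range(j):
--                 for d in range(j):
--                     for e in range(j):
--                         if a<=b and b<=c and c<=d and d<=e:
--                             dist = abs(A[0]-B[a])+abs(A[1]-B[b])+abs(A[2]-B[c])+abs(A[3]-B[d])+abs(A[4]-B[e])
--                             if dist<dist_opt:
--                                 dist_opt = dist
--                                 result.append([a,b,c,d,e])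
--     return dist_opt,result[len(result)-1]
-- ===== SOURCE B (Python) =====
-- def brutal_distance(A, B):
--     # Suffix DP: layers[k][t] = least total distance assigning A[k:5] to
--     # nondecreasing indices >= t of B; then a forward greedy walk rebuilds the
--     # lexicographically smallest optimal index tuple (= A's last appended one).
--     n = len(B)
--     layers = [[0] * n]
--     for v in reversed(A[:5]):
--         w = [abs(v - b) + m for b, m in zip(B, layers[0])]
--         suf = []
--         run = None
--         for x in reversed(w):
--             run = x if run is None else min(x, run)
--             suf.append(run)
--         suf.reverse()
--         layers.insert(0, suf)
--     res = []
--     t = 0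
--     for k in range(5):
--         while abs(A[k] - B[t]) + layers[k + 1][t] != layers[k][t]:
--             t += 1
--         res.append(t)
--     return layers[0][0], res
-- ===== Notes on version B (the rewrite author's own statement) =====
-- stated objective: faster
-- what changed: Replaced the O(n^5) five-fold nested scan over all index tuples by an O(n) suffix dynamic program (per-position running suffix minima of assignment cost) plus a forward greedy walk that reconstructs the lexicographically smallest optimal nondecreasing index tuple, which is exactly the tuple A last appends.
import Mathlib
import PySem

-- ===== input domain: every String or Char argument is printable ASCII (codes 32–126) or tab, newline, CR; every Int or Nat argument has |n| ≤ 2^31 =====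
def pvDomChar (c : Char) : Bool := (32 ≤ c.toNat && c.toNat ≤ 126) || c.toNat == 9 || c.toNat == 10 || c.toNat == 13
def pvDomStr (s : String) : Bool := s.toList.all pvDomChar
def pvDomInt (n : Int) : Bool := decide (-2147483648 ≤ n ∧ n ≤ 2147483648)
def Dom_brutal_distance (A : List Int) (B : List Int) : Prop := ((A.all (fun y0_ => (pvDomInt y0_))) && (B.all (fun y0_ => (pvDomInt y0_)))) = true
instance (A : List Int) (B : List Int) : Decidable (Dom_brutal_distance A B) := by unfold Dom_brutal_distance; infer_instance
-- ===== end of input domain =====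

-- B replaces A's O(n^5) nested scan by an O(n) suffix DP plus a greedy forward
-- reconstruction of the lexicographically smallest optimal index tuple (faster, asymptotic).

-- ===== PORT A =====
-- `float("inf")` is modelled by `none`; `ltInf d o` is Python's `dist < dist_opt`
-- (exact: every int is < inf, and after the first update dist_opt is an int)
def ltInf (d : Int) : Option Int → Bool
  | none => true
  | some v => decide (d < v)

def brutal_distance (A : List Int) (B : List Int) : Int × List Int :=
  -- i = len(A) is computed and never used in the Python
  let j : Int := (B.length : Int)
  let st :=
    (PySem.List.pyRange 0 j 1).foldl (fun s1 a =>
      (PySem.List.pyRange 0 j 1).foldl (fun s2 b =>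
        (PySem.List.pyRange 0 j 1).foldl (fun s3 c =>
          (PySem.List.pyRange 0 j 1).foldl (fun s4 d =>
            (PySem.List.pyRange 0 j 1).foldl (fun s5 e =>
              if a ≤ b ∧ b ≤ c ∧ c ≤ d ∧ d ≤ e then
                let dist :=
                  |PySem.List.pyGetD A 0 0 - PySem.List.pyGetD B a 0| +
                  |PySem.List.pyGetD A 1 0 - PySem.List.pyGetD B b 0| +
                  |PySem.List.pyGetD A 2 0 - PySem.List.pyGetD B c 0| +
                  |PySem.List.pyGetD A 3 0 - PySem.List.pyGetD B d 0| +
                  |PySem.List.pyGetD A 4 0 - PySem.List.pyGetD B e 0|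
                if ltInf dist s5.1 then (some dist, s5.2 ++ [[a, b, c, d, e]]) else s5
              else s5) s4) s3) s2) s1)
      ((none : Option Int), ([] : List (List Int)))
  (st.1.getD 0, (PySem.List.pyGet? st.2 ((st.2.length : Int) - 1)).getD [])

-- ===== PORT B =====
-- the running-minimum pass over reversed(w) of Source B (suf/run loop); exact
def sufRun (w : List Int) : List Int × Option Int :=
  w.reverse.foldl (fun acc x =>
    let run := match acc.2 with | none => x | some r => min x r
    (acc.1 ++ [run], some run)) ([], none)

-- the while-loop of Source B's reconstruction; the fuel only bounds the scan
-- (on every input admitted by Pre_ the loop stops before B's end)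
def walkW (ak : Int) (B Lk1 Lk : List Int) : Nat → Int → Int
  | 0, t => t
  | fuel + 1, t =>
    if |ak - PySem.List.pyGetD B t 0| + PySem.List.pyGetD Lk1 t 0 ≠ PySem.List.pyGetD Lk t 0 then
      walkW ak B Lk1 Lk fuel (t + 1)
    else t

def brutal_distance_alt (A : List Int) (B : List Int) : Int × List Int :=
  let n := B.length
  let layers :=
    ((PySem.List.slice A none (some (5 : Int))).reverse).foldl (fun ls v =>
      let w := (B.zip (PySem.List.pyGetD ls 0 [])).map (fun p => |v - p.1| + p.2)
      ((sufRun w).1.reverse) :: ls) [List.replicate n 0]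
  let st :=
    (PySem.List.pyRange 0 5 1).foldl (fun (st : Int × List Int) k =>
      let t := walkW (PySem.List.pyGetD A k 0) B (PySem.List.pyGetD layers (k + 1) [])
                 (PySem.List.pyGetD layers k []) (n + 1) st.1
      (t, st.2 ++ [t])) ((0 : Int), ([] : List Int))
  (PySem.List.pyGetD (PySem.List.pyGetD layers 0 []) 0 0, st.2)

-- ===== PRECONDITION & SPEC =====
-- Pre_ excludes exactly the inputs where the Python A raises: len(A) < 5 (IndexError on A[4])
-- and B = [] (loops never run, result[-1] raises IndexError)
def Pre_brutal_distance (A : List Int) (B : List Int) : Prop := 5 ≤ A.length ∧ 1 ≤ B.length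
instance (A : List Int) (B : List Int) : Decidable (Pre_brutal_distance A B) := by
  unfold Pre_brutal_distance; infer_instance

def pvWitness_brutal_distance : List Int × List Int := ([3, 1, 4, 1, 5], [2, 7])

def Spec_brutal_distance (A : List Int) (B : List Int) (out : Int × List Int) : Prop := out = brutal_distance_alt A B
instance (A : List Int) (B : List Int) (out : Int × List Int) : Decidable (Spec_brutal_distance A B out) := by unfold Spec_brutal_distance; infer_instance

-- ===== CLAIM (what is proved, stated in full; the proofs are below) =====
def Claim_equal_brutal_distance : Prop := ∀ (A : List Int) (B : List Int), Dom_brutal_distance A B → Pre_brutal_distance A B → Spec_brutal_distance A B (brutal_distance A B)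

-- ===== LEMMAS AND PROOFS =====

-- ---- the common mathematical object: candidate lists, first-strict-minimum folds ----

-- first-strict-minimum update: A's `if dist < dist_opt` on (cost, tuple) pairs
def upd : Option (Int × List Int) → (Int × List Int) → Option (Int × List Int)
  | none, p => some p
  | some q, p => if p.1 < q.1 then some p else some q

def merge (s o : Option (Int × List Int)) : Option (Int × List Int) :=
  match o with
  | none => s
  | some p => upd s p

def phi (B : List Int) (v t : Int) (p : Int × List Int) : Int × List Int :=
  (|v - PySem.List.pyGetD B t 0| + p.1, t :: p.2)

-- all candidate (cost, index-tuple) pairs for values vs at nondecreasing indices ≥ c, in lex order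
def CL (B : List Int) : List Int → Int → List (Int × List Int)
  | [], _ => [(0, [])]
  | v :: vs, c =>
    (PySem.List.pyRange c (B.length : Int) 1).flatMap (fun t =>
      (CL B vs t).map (phi B v t))

def F (B : List Int) (vs : List Int) (c : Int) : Option (Int × List Int) :=
  (CL B vs c).foldl upd none

def mcost (B : List Int) (vs : List Int) (c : Int) : Int := ((F B vs c).getD (0, [])).1
def tup (B : List Int) (vs : List Int) (c : Int) : List Int := ((F B vs c).getD (0, [])).2

def layerFrom (B vs : List Int) (c : Nat) : List Int :=
  if _h : c < B.length then mcost B vs (c : Int) :: layerFrom B vs (c + 1) else []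
  termination_by B.length - c

-- structural suffix-minima spec for the sufRun pass
def sMins : List Int → List Int
  | [] => []
  | x :: xs =>
    match sMins xs with
    | [] => [x]
    | y :: ys => min x y :: y :: ys

theorem merge_none_left (o : Option (Int × List Int)) : merge none o = o := by
  cases o <;> rfl

theorem merge_assoc (s o1 o2 : Option (Int × List Int)) :
    merge (merge s o1) o2 = merge s (merge o1 o2) := by
  rcases s with _ | q
  · rw [merge_none_left, merge_none_left]
  · rcases o1 with _ | p1
    · show merge (some q) o2 = merge (some q) (merge none o2)
      rw [merge_none_left]
    · rcases o2 with _ | p2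
      · rfl
      · show merge (upd (some q) p1) (some p2) = merge (some q) (upd (some p1) p2)
        by_cases h1 : p1.1 < q.1 <;> by_cases h2 : p2.1 < p1.1 <;>
          simp [h1, h2, merge, upd] <;> omega

theorem foldl_merge_seed {α : Type} (h : α → Option (Int × List Int)) (l : List α)
    (s : Option (Int × List Int)) :
    l.foldl (fun s x => merge s (h x)) s = merge s (l.foldl (fun s x => merge s (h x)) none) := by
  induction l generalizing s with
  | nil => simp [merge]
  | cons x xs ih =>
    simp only [List.foldl_cons]
    rw [ih, ih (merge none (h x)), merge_none_left, merge_assoc]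

theorem foldl_upd_seed (l : List (Int × List Int)) (s : Option (Int × List Int)) :
    l.foldl upd s = merge s (l.foldl upd none) := by
  have h : ∀ (s' : Option (Int × List Int)), l.foldl upd s' =
      l.foldl (fun s x => merge s (some x)) s' := by
    intro s'; rfl
  rw [h s, h none, foldl_merge_seed]

theorem foldl_upd_map_phi (B : List Int) (v t : Int) (l : List (Int × List Int)) :
    (l.map (phi B v t)).foldl upd none = Option.map (phi B v t) (l.foldl upd none) := by
  have key : ∀ (o : Option (Int × List Int)),
      (l.map (phi B v t)).foldl upd (Option.map (phi B v t) o) =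
        Option.map (phi B v t) (l.foldl upd o) := by
    induction l with
    | nil => intro o; simp
    | cons p ps ih =>
      intro o
      simp only [List.map_cons, List.foldl_cons]
      have : upd (Option.map (phi B v t) o) (phi B v t p) =
          Option.map (phi B v t) (upd o p) := by
        rcases o with _ | q
        · rfl
        · simp only [Option.map_some, upd, phi]
          split_ifs <;> simp [phi] <;> omega
      rw [this, ih]
  simpa using key none

theorem merge_isSome_left (p : Int × List Int) (o : Option (Int × List Int)) :
    (merge (some p) o).isSome := by
  cases o <;> (simp [merge, upd]; try (split_ifs <;> simp))

theorem F_cons (B : List Int) (v : Int) (vs : List Int) (c : Int) :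
    F B (v :: vs) c =
      (PySem.List.pyRange c (B.length : Int) 1).foldl
        (fun s t => merge s (Option.map (phi B v t) (F B vs t))) none := by
  show (CL B (v :: vs) c).foldl upd none = _
  simp only [CL, List.foldl_flatMap]
  apply PySem.List.foldl_congr_mem
  intro acc t _
  rw [foldl_upd_seed, foldl_upd_map_phi]
  rfl

theorem F_stop (B : List Int) (v : Int) (vs : List Int) (c : Int) (h : (B.length : Int) ≤ c) :
    F B (v :: vs) c = none := by
  show (CL B (v :: vs) c).foldl upd none = none
  simp only [CL, PySem.List.pyRange_one_eq_nil h, List.flatMap_nil, List.foldl_nil]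

theorem F_succ (B : List Int) (v : Int) (vs : List Int) (c : Int) (h : c < (B.length : Int)) :
    F B (v :: vs) c = merge (Option.map (phi B v c) (F B vs c)) (F B (v :: vs) (c + 1)) := by
  rw [F_cons, PySem.List.pyRange_one_cons h, List.foldl_cons, foldl_merge_seed, ← F_cons,
    merge_none_left]

theorem F_isSome (B : List Int) (vs : List Int) (c : Int) (h : c < (B.length : Int)) :
    (F B vs c).isSome := by
  induction vs generalizing c with
  | nil => rfl
  | cons v vs ih =>
    rw [F_succ B v vs c h]
    obtain ⟨p, hp⟩ := Option.isSome_iff_exists.mp (ih c h)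
    rw [hp]
    exact merge_isSome_left _ _

theorem F_eq_some (B : List Int) (vs : List Int) (c : Int) (h : c < (B.length : Int)) :
    F B vs c = some (mcost B vs c, tup B vs c) := by
  obtain ⟨p, hp⟩ := Option.isSome_iff_exists.mp (F_isSome B vs c h)
  simp [mcost, tup, hp]


def wv (B : List Int) (v : Int) (vs : List Int) (t : Int) : Int :=
  |v - PySem.List.pyGetD B t 0| + mcost B vs t

theorem F_last (B : List Int) (v : Int) (vs : List Int) (c : Int)
    (h : c < (B.length : Int)) (h2 : (B.length : Int) ≤ c + 1) :
    F B (v :: vs) c = some (wv B v vs c, c :: tup B vs c) := by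
  rw [F_succ B v vs c h, F_stop B v vs (c + 1) h2, F_eq_some B vs c h]
  rfl

theorem mcost_last (B : List Int) (v : Int) (vs : List Int) (c : Int)
    (h : c < (B.length : Int)) (h2 : (B.length : Int) ≤ c + 1) :
    mcost B (v :: vs) c = wv B v vs c := by
  unfold mcost; rw [F_last B v vs c h h2]; rfl

theorem tup_last (B : List Int) (v : Int) (vs : List Int) (c : Int)
    (h : c < (B.length : Int)) (h2 : (B.length : Int) ≤ c + 1) :
    tup B (v :: vs) c = c :: tup B vs c := by
  unfold tup; rw [F_last B v vs c h h2]; rfl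

theorem F_mid (B : List Int) (v : Int) (vs : List Int) (c : Int)
    (h2 : c + 1 < (B.length : Int)) :
    F B (v :: vs) c =
      if mcost B (v :: vs) (c + 1) < wv B v vs c
      then some (mcost B (v :: vs) (c + 1), tup B (v :: vs) (c + 1))
      else some (wv B v vs c, c :: tup B vs c) := by
  have h : c < (B.length : Int) := by omega
  rw [F_succ B v vs c h, F_eq_some B vs c h, F_eq_some B (v :: vs) (c + 1) h2]
  simp only [Option.map_some, merge, upd, phi, wv]

theorem mcost_min (B : List Int) (v : Int) (vs : List Int) (c : Int)
    (h2 : c + 1 < (B.length : Int)) :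
    mcost B (v :: vs) c = min (wv B v vs c) (mcost B (v :: vs) (c + 1)) := by
  have hm := F_mid B v vs c h2
  by_cases hlt : mcost B (v :: vs) (c + 1) < wv B v vs c
  · rw [if_pos hlt] at hm
    have : mcost B (v :: vs) c = mcost B (v :: vs) (c + 1) := by simp [mcost, hm]
    omega
  · rw [if_neg hlt] at hm
    have : mcost B (v :: vs) c = wv B v vs c := by simp [mcost, hm]
    omega

theorem tup_pick (B : List Int) (v : Int) (vs : List Int) (c : Int)
    (h : c < (B.length : Int)) (heq : wv B v vs c = mcost B (v :: vs) c) :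
    tup B (v :: vs) c = c :: tup B vs c := by
  by_cases h2 : c + 1 < (B.length : Int)
  · have hm := mcost_min B v vs c h2
    unfold tup
    rw [F_mid B v vs c h2, if_neg (by omega)]
    rfl
  · exact tup_last B v vs c h (by omega)

theorem F_skip (B : List Int) (v : Int) (vs : List Int) (c : Int)
    (h2 : c + 1 < (B.length : Int)) (hne : wv B v vs c ≠ mcost B (v :: vs) c) :
    F B (v :: vs) c = F B (v :: vs) (c + 1) := by
  have hm := mcost_min B v vs c h2
  rw [F_mid B v vs c h2, if_pos (by omega), F_eq_some B (v :: vs) (c + 1) h2]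

-- ---- the sufRun pass computes structural suffix minima ----

def mn (r : Option Int) (x : Int) : Int := match r with | none => x | some rr => min x rr

def pm (r : Option Int) : List Int → List Int
  | [] => []
  | x :: xs => mn r x :: pm (some (mn r x)) xs

def pmLast (r : Option Int) : List Int → Option Int
  | [] => r
  | x :: xs => pmLast (some (mn r x)) xs

theorem sufRun_foldl_char (ys : List Int) : ∀ (acc : List Int) (r : Option Int),
    ys.foldl (fun acc x =>
      let run := match acc.2 with | none => x | some r => min x r
      (acc.1 ++ [run], some run)) (acc, r) = (acc ++ pm r ys, pmLast r ys) := by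
  induction ys with
  | nil => intro acc r; simp [pm, pmLast]
  | cons x xs ih =>
    intro acc r
    simp only [List.foldl_cons]
    cases r with
    | none =>
      show xs.foldl _ (acc ++ [x], some x) = _
      rw [ih]
      simp [pm, pmLast, mn]
    | some rr =>
      show xs.foldl _ (acc ++ [min x rr], some (min x rr)) = _
      rw [ih]
      simp [pm, pmLast, mn]

theorem sufRun_fst (w : List Int) : (sufRun w).1 = pm none w.reverse := by
  unfold sufRun
  rw [sufRun_foldl_char]
  simp

theorem pm_append (ys : List Int) : ∀ (r : Option Int) (x : Int),
    pm r (ys ++ [x]) = pm r ys ++ [mn (pmLast r ys) x] := by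
  induction ys with
  | nil => intro r x; simp [pm, pmLast]
  | cons y yy ih => intro r x; simp only [List.cons_append, pm, pmLast, ih]

theorem pmLast_or (ys : List Int) : ∀ (r : Option Int),
    pmLast r ys = ((pm r ys).getLast?).or r := by
  induction ys with
  | nil => intro r; simp [pm, pmLast]
  | cons y yy ih =>
    intro r
    simp only [pm, pmLast, ih]
    cases hyy : pm (some (mn r y)) yy with
    | nil => simp
    | cons z zz =>
      obtain ⟨a, ha⟩ : ∃ a, (z :: zz).getLast? = some a :=
        Option.isSome_iff_exists.mp (List.getLast?_isSome.mpr (by simp))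
      simp [ha]

theorem pm_rev_eq_sMins (w : List Int) : (pm none w.reverse).reverse = sMins w := by
  induction w with
  | nil => rfl
  | cons x xs ih =>
    simp only [List.reverse_cons, pm_append, List.reverse_append, List.reverse_cons,
      List.reverse_nil, List.nil_append, List.singleton_append]
    cases hs : sMins xs with
    | nil =>
      have hpm : pm none xs.reverse = [] := by
        have := ih; rw [hs] at this
        simpa using congrArg List.reverse this
      simp [sMins, hs, hpm, pmLast_or, mn]
    | cons y ys =>
      have hpm : pm none xs.reverse = (y :: ys).reverse := by
        have := ih; rw [hs] at this
        rw [← this, List.reverse_reverse]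
      have hlast : (pm none xs.reverse).getLast? = some y := by
        rw [hpm]
        simp [List.getLast?_reverse]
      simp only [sMins, hs, pmLast_or, hlast, mn, ih]
      rfl

theorem sufRun_rev (w : List Int) : (sufRun w).1.reverse = sMins w := by
  rw [sufRun_fst, pm_rev_eq_sMins]

-- ---- layers ----

theorem layerFrom_unfold_pos (B vs : List Int) (c : Nat) (h : c < B.length) :
    layerFrom B vs c = mcost B vs (c : Int) :: layerFrom B vs (c + 1) := by
  rw [layerFrom, dif_pos h]

theorem layerFrom_unfold_neg (B vs : List Int) (c : Nat) (h : ¬ c < B.length) :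
    layerFrom B vs c = [] := by
  rw [layerFrom, dif_neg h]

theorem layerFrom_getD (B vs : List Int) : ∀ (k c : Nat), c + k < B.length →
    (layerFrom B vs c).getD k 0 = mcost B vs ((c : Int) + (k : Int)) := by
  intro k
  induction k with
  | zero => intro c hc; rw [layerFrom_unfold_pos B vs c (by omega)]; simp
  | succ k ih =>
    intro c hc
    rw [layerFrom_unfold_pos B vs c (by omega)]
    show (layerFrom B vs (c + 1)).getD k 0 = _
    rw [ih (c + 1) (by omega)]
    push_cast
    ring_nf

theorem mcost_nil (B : List Int) (c : Int) : mcost B [] c = 0 := rfl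

theorem layerFrom_nil (B : List Int) : ∀ c, layerFrom B [] c = List.replicate (B.length - c) 0 := by
  intro c
  induction hk : B.length - c generalizing c with
  | zero => rw [layerFrom_unfold_neg B [] c (by omega)]; rfl
  | succ k ih =>
    rw [layerFrom_unfold_pos B [] c (by omega), mcost_nil, List.replicate_succ,
      ih (c + 1) (by omega)]

theorem layer_step (B vs : List Int) (v : Int) : ∀ (k c : Nat), B.length ≤ c + k →
    sMins (((B.drop c).zip (layerFrom B vs c)).map (fun p => |v - p.1| + p.2)) =
      layerFrom B (v :: vs) c := by
  intro k
  induction k with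
  | zero =>
    intro c hc
    rw [List.drop_eq_nil_of_le (by omega), layerFrom_unfold_neg B (v :: vs) c (by omega)]
    rfl
  | succ k ih =>
    intro c hc
    by_cases h : c < B.length
    · have hget : PySem.List.pyGetD B (c : Int) 0 = B[c] := by
        rw [PySem.List.pyGetD_natCast, List.getD_eq_getElem B 0 h]
      rw [List.drop_eq_getElem_cons h, layerFrom_unfold_pos B vs c h]
      simp only [List.zip_cons_cons, List.map_cons, sMins]
      rw [ih (c + 1) (by omega)]
      rw [layerFrom_unfold_pos B (v :: vs) c h]
      by_cases h2 : c + 1 < B.length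
      · rw [layerFrom_unfold_pos B (v :: vs) (c + 1) h2]
        have hm := mcost_min B v vs (c : Int) (by omega)
        show min (|v - B[c]| + mcost B vs (c : Int)) (mcost B (v :: vs) ((c + 1 : Nat) : Int)) ::
            mcost B (v :: vs) ((c + 1 : Nat) : Int) :: layerFrom B (v :: vs) (c + 1 + 1) = _
        congr 1
        rw [hm]
        simp only [wv, hget]
        push_cast
        ring_nf
      · rw [layerFrom_unfold_neg B (v :: vs) (c + 1) h2]
        show [|v - B[c]| + mcost B vs (c : Int)] = _
        have hm := mcost_last B v vs (c : Int) (by omega) (by omega)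
        rw [hm]
        simp only [wv, hget]
    · rw [List.drop_eq_nil_of_le (by omega), layerFrom_unfold_neg B (v :: vs) c (by omega)]
      rfl

theorem layer_pyGetD (B vs : List Int) (t : Int) (h0 : 0 ≤ t) (h1 : t < (B.length : Int)) :
    PySem.List.pyGetD (layerFrom B vs 0) t 0 = mcost B vs t := by
  rw [show t = ((t.toNat : Nat) : Int) from by omega, PySem.List.pyGetD_natCast]
  rw [layerFrom_getD B vs t.toNat 0 (by omega)]
  congr 1
  omega

theorem walkW_spec (B vs : List Int) (v : Int) :
    ∀ (fuel : Nat) (t : Int), 0 ≤ t → t < (B.length : Int) →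
      (B.length : Int) - t ≤ (fuel : Int) →
      0 ≤ walkW v B (layerFrom B vs 0) (layerFrom B (v :: vs) 0) fuel t ∧
      t ≤ walkW v B (layerFrom B vs 0) (layerFrom B (v :: vs) 0) fuel t ∧
      walkW v B (layerFrom B vs 0) (layerFrom B (v :: vs) 0) fuel t < (B.length : Int) ∧
      tup B (v :: vs) t =
        walkW v B (layerFrom B vs 0) (layerFrom B (v :: vs) 0) fuel t ::
          tup B vs (walkW v B (layerFrom B vs 0) (layerFrom B (v :: vs) 0) fuel t) := by
  intro fuel
  induction fuel with
  | zero =>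
    intro t h0 h1 h2
    exfalso
    simp only [Nat.cast_zero] at h2
    omega
  | succ fuel ih =>
    intro t h0 h1 h2
    have hL1 : PySem.List.pyGetD (layerFrom B vs 0) t 0 = mcost B vs t :=
      layer_pyGetD B vs t h0 h1
    have hL0 : PySem.List.pyGetD (layerFrom B (v :: vs) 0) t 0 = mcost B (v :: vs) t :=
      layer_pyGetD B (v :: vs) t h0 h1
    have hcond : (|v - PySem.List.pyGetD B t 0| + PySem.List.pyGetD (layerFrom B vs 0) t 0 ≠
        PySem.List.pyGetD (layerFrom B (v :: vs) 0) t 0) ↔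
        (wv B v vs t ≠ mcost B (v :: vs) t) := by
      rw [hL1, hL0]
      exact Iff.rfl
    by_cases hC : wv B v vs t ≠ mcost B (v :: vs) t
    · have h2' : t + 1 < (B.length : Int) := by
        by_contra hn
        exact hC (Eq.symm (mcost_last B v vs t h1 (by omega)))
      have hw : walkW v B (layerFrom B vs 0) (layerFrom B (v :: vs) 0) (fuel + 1) t =
          walkW v B (layerFrom B vs 0) (layerFrom B (v :: vs) 0) fuel (t + 1) := by
        rw [walkW, if_pos (hcond.mpr hC)]
      obtain ⟨g0, g1, g2, g3⟩ := ih (t + 1) (by omega) h2' (by push_cast at h2 ⊢; omega)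
      have htup : tup B (v :: vs) t = tup B (v :: vs) (t + 1) := by
        unfold tup
        rw [F_skip B v vs t h2' hC]
      refine ⟨by omega, by omega, by omega, ?_⟩
      rw [hw, htup]
      exact g3
    · have heq : wv B v vs t = mcost B (v :: vs) t := by
        by_contra hn
        exact hC hn
      have hw : walkW v B (layerFrom B vs 0) (layerFrom B (v :: vs) 0) (fuel + 1) t = t := by
        rw [walkW, if_neg (fun hx => hC (hcond.mp hx))]
      rw [hw]
      exact ⟨h0, le_refl t, h1, tup_pick B v vs t h1 heq⟩

-- ---- A-side: eliminating the guard, shrinking the ranges ----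

theorem guard_fold_split {σ : Type} (C : Int → Prop) [DecidablePred C] (P : Prop) [Decidable P]
    (Q : Int → Prop) [DecidablePred Q] (hiff : ∀ x, C x ↔ (P ∧ Q x)) (f : σ → Int → σ)
    (l : List Int) (s : σ) :
    l.foldl (fun s x => if C x then f s x else s) s =
      if P then l.foldl (fun s x => if Q x then f s x else s) s else s := by
  split_ifs with hP
  · apply PySem.List.foldl_congr_mem
    intro acc x _
    by_cases hQ : Q x
    · rw [if_pos ((hiff x).mpr ⟨hP, hQ⟩), if_pos hQ]
    · rw [if_neg (fun hc => hQ ((hiff x).mp hc).2), if_neg hQ]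
  · have h : l.foldl (fun s x => if C x then f s x else s) s = l.foldl (fun s _ => s) s :=
      PySem.List.foldl_congr_mem _ _ _ _ (fun acc x _ => by
        rw [if_neg (fun hc => hP ((hiff x).mp hc).1)])
    rw [h, PySem.List.foldl_ignore]

theorem range_guard {σ : Type} (a j : Int) (h0 : 0 ≤ a) (f : σ → Int → σ) (s : σ) :
    (PySem.List.pyRange 0 j 1).foldl (fun s x => if a ≤ x then f s x else s) s =
      (PySem.List.pyRange a j 1).foldl f s := by
  by_cases haj : a ≤ j
  · rw [PySem.List.pyRange_one_append 0 a j h0 haj, List.foldl_append]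
    have h1 : (PySem.List.pyRange 0 a 1).foldl (fun s x => if a ≤ x then f s x else s) s = s := by
      have h : (PySem.List.pyRange 0 a 1).foldl (fun s x => if a ≤ x then f s x else s) s =
          (PySem.List.pyRange 0 a 1).foldl (fun s _ => s) s :=
        PySem.List.foldl_congr_mem _ _ _ _ (fun acc x hx => by
          have hm := (PySem.List.mem_pyRange_one).mp hx
          rw [if_neg (by omega)])
      rw [h, PySem.List.foldl_ignore]
    rw [h1]
    exact PySem.List.foldl_congr_mem _ _ _ _ (fun acc x hx => by
      have hm := (PySem.List.mem_pyRange_one).mp hx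
      rw [if_pos (by omega)])
  · rw [PySem.List.pyRange_one_eq_nil (by omega : j ≤ a), List.foldl_nil]
    have h : (PySem.List.pyRange 0 j 1).foldl (fun s x => if a ≤ x then f s x else s) s =
        (PySem.List.pyRange 0 j 1).foldl (fun s _ => s) s :=
      PySem.List.foldl_congr_mem _ _ _ _ (fun acc x hx => by
        have hm := (PySem.List.mem_pyRange_one).mp hx
        rw [if_neg (by omega)])
    rw [h, PySem.List.foldl_ignore]

theorem levelGen {σ : Type} (C : Int → Prop) [DecidablePred C] (P : Prop) [Decidable P]
    (y j : Int) (hy : 0 ≤ y) (hiff : ∀ x, C x ↔ (P ∧ y ≤ x)) (G : σ → Int → σ) (s : σ) :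
    (PySem.List.pyRange 0 j 1).foldl (fun s x => if C x then G s x else s) s =
      if P then (PySem.List.pyRange y j 1).foldl G s else s := by
  rw [guard_fold_split C P (fun x => y ≤ x) hiff G]
  split_ifs with h
  · exact range_guard y j hy G s
  · rfl

-- ---- A-side: the loop state (dist_opt, result) tracked against the first-minimum fold ----

def updA (s : Option Int × List (List Int)) (p : Int × List Int) : Option Int × List (List Int) :=
  if ltInf p.1 s.1 then (some p.1, s.2 ++ [p.2]) else s

def RelA (s : Option Int × List (List Int)) (o : Option (Int × List Int)) : Prop :=
  s.1 = Option.map Prod.fst o ∧ s.2.getLast? = Option.map Prod.snd o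

theorem RelA_step (s : Option Int × List (List Int)) (o : Option (Int × List Int))
    (p : Int × List Int) (h : RelA s o) : RelA (updA s p) (upd o p) := by
  obtain ⟨h1, h2⟩ := h
  cases o with
  | none =>
    simp only [Option.map_none] at h1
    simp [updA, upd, ltInf, h1, RelA]
  | some q =>
    simp only [Option.map_some] at h1
    simp only [updA, upd, ltInf, h1]
    by_cases hlt : p.1 < q.1
    · rw [if_pos (by simpa using hlt), if_pos hlt]
      simp [RelA]
    · rw [if_neg (by simpa using hlt), if_neg hlt]
      exact ⟨h1, h2⟩

theorem RelA_fold (l : List (Int × List Int)) : ∀ s o, RelA s o →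
    RelA (l.foldl updA s) (l.foldl upd o) := by
  induction l with
  | nil => intro s o h; exact h
  | cons p ps ih =>
    intro s o h
    exact ih (updA s p) (upd o p) (RelA_step s o p h)

-- ---- A-side: the normalised nested fold is the candidate-list fold ----

def nestedFold (B : List Int) : List Int → Int → (Int × List Int → Int × List Int) →
    (Option Int × List (List Int)) → Option Int × List (List Int)
  | [], _, g, s => updA s (g (0, []))
  | v :: vs, c, g, s =>
    (PySem.List.pyRange c (B.length : Int) 1).foldl
      (fun s t => nestedFold B vs t (g ∘ phi B v t) s) s

theorem foldA_CL (B : List Int) : ∀ (vs : List Int) (c : Int)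
    (g : Int × List Int → Int × List Int) (s : Option Int × List (List Int)),
    (CL B vs c).foldl (fun s p => updA s (g p)) s = nestedFold B vs c g s := by
  intro vs
  induction vs with
  | nil => intro c g s; rfl
  | cons v vs ih =>
    intro c g s
    simp only [CL, nestedFold, List.foldl_flatMap]
    apply PySem.List.foldl_congr_mem
    intro acc t _
    rw [List.foldl_map]
    simpa [Function.comp] using ih t (g ∘ phi B v t) acc

def stA (A B : List Int) : Option Int × List (List Int) :=
  (PySem.List.pyRange 0 ((B.length : Int)) 1).foldl (fun s1 a =>
    (PySem.List.pyRange 0 ((B.length : Int)) 1).foldl (fun s2 b =>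
      (PySem.List.pyRange 0 ((B.length : Int)) 1).foldl (fun s3 c =>
        (PySem.List.pyRange 0 ((B.length : Int)) 1).foldl (fun s4 d =>
          (PySem.List.pyRange 0 ((B.length : Int)) 1).foldl (fun s5 e =>
            if a ≤ b ∧ b ≤ c ∧ c ≤ d ∧ d ≤ e then
              updA s5
                (|PySem.List.pyGetD A 0 0 - PySem.List.pyGetD B a 0| +
                 |PySem.List.pyGetD A 1 0 - PySem.List.pyGetD B b 0| +
                 |PySem.List.pyGetD A 2 0 - PySem.List.pyGetD B c 0| +
                 |PySem.List.pyGetD A 3 0 - PySem.List.pyGetD B d 0| +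
                 |PySem.List.pyGetD A 4 0 - PySem.List.pyGetD B e 0|, [a, b, c, d, e])
            else s5) s4) s3) s2) s1)
    ((none : Option Int), ([] : List (List Int)))

theorem A_nested (A B : List Int) :
    stA A B =
    nestedFold B [PySem.List.pyGetD A 0 0, PySem.List.pyGetD A 1 0, PySem.List.pyGetD A 2 0,
      PySem.List.pyGetD A 3 0, PySem.List.pyGetD A 4 0] 0 id ((none : Option Int), []) := by
  unfold stA
  simp only [nestedFold]
  apply PySem.List.foldl_congr_mem
  intro s1 a ha
  obtain ⟨ha0, -⟩ := (PySem.List.mem_pyRange_one).mp ha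
  -- step 0: replace the flat pair by the phi-nest, pointwise
  have step0 : ∀ s,
      (PySem.List.pyRange 0 ((B.length : Int)) 1).foldl (fun s2 b =>
        (PySem.List.pyRange 0 ((B.length : Int)) 1).foldl (fun s3 c =>
          (PySem.List.pyRange 0 ((B.length : Int)) 1).foldl (fun s4 d =>
            (PySem.List.pyRange 0 ((B.length : Int)) 1).foldl (fun s5 e =>
              if a ≤ b ∧ b ≤ c ∧ c ≤ d ∧ d ≤ e then
                updA s5
                  (|PySem.List.pyGetD A 0 0 - PySem.List.pyGetD B a 0| +
                   |PySem.List.pyGetD A 1 0 - PySem.List.pyGetD B b 0| +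
                   |PySem.List.pyGetD A 2 0 - PySem.List.pyGetD B c 0| +
                   |PySem.List.pyGetD A 3 0 - PySem.List.pyGetD B d 0| +
                   |PySem.List.pyGetD A 4 0 - PySem.List.pyGetD B e 0|, [a, b, c, d, e])
              else s5) s4) s3) s2) s =
      (PySem.List.pyRange 0 ((B.length : Int)) 1).foldl (fun s2 b =>
        (PySem.List.pyRange 0 ((B.length : Int)) 1).foldl (fun s3 c =>
          (PySem.List.pyRange 0 ((B.length : Int)) 1).foldl (fun s4 d =>
            (PySem.List.pyRange 0 ((B.length : Int)) 1).foldl (fun s5 e =>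
              if a ≤ b ∧ b ≤ c ∧ c ≤ d ∧ d ≤ e then
                updA s5 (phi B (PySem.List.pyGetD A 0 0) a (phi B (PySem.List.pyGetD A 1 0) b
                  (phi B (PySem.List.pyGetD A 2 0) c (phi B (PySem.List.pyGetD A 3 0) d
                    (phi B (PySem.List.pyGetD A 4 0) e (0, []))))))
              else s5) s4) s3) s2) s := by
    intro s
    apply PySem.List.foldl_congr_mem
    intro s2 b _
    apply PySem.List.foldl_congr_mem
    intro s3 c _
    apply PySem.List.foldl_congr_mem
    intro s4 d _
    apply PySem.List.foldl_congr_mem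
    intro s5 e _
    refine if_congr Iff.rfl (congrArg (updA s5) ?_) rfl
    simp only [phi]
    refine Prod.ext_iff.mpr ⟨?_, rfl⟩
    ring
  rw [step0]
  -- now eliminate the guard level by level, shrinking each range
  have trE : ∀ (b c d : Int), 0 ≤ d → ∀ s,
      (PySem.List.pyRange 0 ((B.length : Int)) 1).foldl (fun s5 e =>
        if a ≤ b ∧ b ≤ c ∧ c ≤ d ∧ d ≤ e then
          updA s5 (phi B (PySem.List.pyGetD A 0 0) a (phi B (PySem.List.pyGetD A 1 0) b
            (phi B (PySem.List.pyGetD A 2 0) c (phi B (PySem.List.pyGetD A 3 0) d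
              (phi B (PySem.List.pyGetD A 4 0) e (0, []))))))
        else s5) s =
      if a ≤ b ∧ b ≤ c ∧ c ≤ d then
        (PySem.List.pyRange d ((B.length : Int)) 1).foldl (fun s5 e =>
          updA s5 (phi B (PySem.List.pyGetD A 0 0) a (phi B (PySem.List.pyGetD A 1 0) b
            (phi B (PySem.List.pyGetD A 2 0) c (phi B (PySem.List.pyGetD A 3 0) d
              (phi B (PySem.List.pyGetD A 4 0) e (0, []))))))) s
      else s := by
    intro b c d hd s
    exact levelGen _ (a ≤ b ∧ b ≤ c ∧ c ≤ d) d _ hd (fun e => by tauto) _ s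
  have trD : ∀ (b c : Int), 0 ≤ c → ∀ s,
      (PySem.List.pyRange 0 ((B.length : Int)) 1).foldl (fun s4 d =>
        if a ≤ b ∧ b ≤ c ∧ c ≤ d then
          (PySem.List.pyRange d ((B.length : Int)) 1).foldl (fun s5 e =>
            updA s5 (phi B (PySem.List.pyGetD A 0 0) a (phi B (PySem.List.pyGetD A 1 0) b
              (phi B (PySem.List.pyGetD A 2 0) c (phi B (PySem.List.pyGetD A 3 0) d
                (phi B (PySem.List.pyGetD A 4 0) e (0, []))))))) s4
        else s4) s =
      if a ≤ b ∧ b ≤ c then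
        (PySem.List.pyRange c ((B.length : Int)) 1).foldl (fun s4 d =>
          (PySem.List.pyRange d ((B.length : Int)) 1).foldl (fun s5 e =>
            updA s5 (phi B (PySem.List.pyGetD A 0 0) a (phi B (PySem.List.pyGetD A 1 0) b
              (phi B (PySem.List.pyGetD A 2 0) c (phi B (PySem.List.pyGetD A 3 0) d
                (phi B (PySem.List.pyGetD A 4 0) e (0, []))))))) s4) s
      else s := by
    intro b c hc s
    exact levelGen _ (a ≤ b ∧ b ≤ c) c _ hc (fun d => by tauto) _ s
  have trC : ∀ (b : Int), 0 ≤ b → ∀ s,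
      (PySem.List.pyRange 0 ((B.length : Int)) 1).foldl (fun s3 c =>
        if a ≤ b ∧ b ≤ c then
          (PySem.List.pyRange c ((B.length : Int)) 1).foldl (fun s4 d =>
            (PySem.List.pyRange d ((B.length : Int)) 1).foldl (fun s5 e =>
              updA s5 (phi B (PySem.List.pyGetD A 0 0) a (phi B (PySem.List.pyGetD A 1 0) b
                (phi B (PySem.List.pyGetD A 2 0) c (phi B (PySem.List.pyGetD A 3 0) d
                  (phi B (PySem.List.pyGetD A 4 0) e (0, []))))))) s4) s3
        else s3) s =
      if a ≤ b then
        (PySem.List.pyRange b ((B.length : Int)) 1).foldl (fun s3 c =>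
          (PySem.List.pyRange c ((B.length : Int)) 1).foldl (fun s4 d =>
            (PySem.List.pyRange d ((B.length : Int)) 1).foldl (fun s5 e =>
              updA s5 (phi B (PySem.List.pyGetD A 0 0) a (phi B (PySem.List.pyGetD A 1 0) b
                (phi B (PySem.List.pyGetD A 2 0) c (phi B (PySem.List.pyGetD A 3 0) d
                  (phi B (PySem.List.pyGetD A 4 0) e (0, []))))))) s4) s3) s
      else s := by
    intro b hb s
    exact levelGen _ (a ≤ b) b _ hb (fun c => by tauto) _ s
  -- rewrite levels inside out under the memberships, then collapse the b-level
  have inner : ∀ s,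
      (PySem.List.pyRange 0 ((B.length : Int)) 1).foldl (fun s2 b =>
        (PySem.List.pyRange 0 ((B.length : Int)) 1).foldl (fun s3 c =>
          (PySem.List.pyRange 0 ((B.length : Int)) 1).foldl (fun s4 d =>
            (PySem.List.pyRange 0 ((B.length : Int)) 1).foldl (fun s5 e =>
              if a ≤ b ∧ b ≤ c ∧ c ≤ d ∧ d ≤ e then
                updA s5 (phi B (PySem.List.pyGetD A 0 0) a (phi B (PySem.List.pyGetD A 1 0) b
                  (phi B (PySem.List.pyGetD A 2 0) c (phi B (PySem.List.pyGetD A 3 0) d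
                    (phi B (PySem.List.pyGetD A 4 0) e (0, []))))))
              else s5) s4) s3) s2) s =
      (PySem.List.pyRange 0 ((B.length : Int)) 1).foldl (fun s2 b =>
        if a ≤ b then
          (PySem.List.pyRange b ((B.length : Int)) 1).foldl (fun s3 c =>
            (PySem.List.pyRange c ((B.length : Int)) 1).foldl (fun s4 d =>
              (PySem.List.pyRange d ((B.length : Int)) 1).foldl (fun s5 e =>
                updA s5 (phi B (PySem.List.pyGetD A 0 0) a (phi B (PySem.List.pyGetD A 1 0) b
                  (phi B (PySem.List.pyGetD A 2 0) c (phi B (PySem.List.pyGetD A 3 0) d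
                    (phi B (PySem.List.pyGetD A 4 0) e (0, []))))))) s4) s3) s2
        else s2) s := by
    intro s
    apply PySem.List.foldl_congr_mem
    intro s2 b hb
    obtain ⟨hb0, -⟩ := (PySem.List.mem_pyRange_one).mp hb
    have e1 : (PySem.List.pyRange 0 ((B.length : Int)) 1).foldl (fun s3 c =>
        (PySem.List.pyRange 0 ((B.length : Int)) 1).foldl (fun s4 d =>
          (PySem.List.pyRange 0 ((B.length : Int)) 1).foldl (fun s5 e =>
            if a ≤ b ∧ b ≤ c ∧ c ≤ d ∧ d ≤ e then
              updA s5 (phi B (PySem.List.pyGetD A 0 0) a (phi B (PySem.List.pyGetD A 1 0) b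
                (phi B (PySem.List.pyGetD A 2 0) c (phi B (PySem.List.pyGetD A 3 0) d
                  (phi B (PySem.List.pyGetD A 4 0) e (0, []))))))
            else s5) s4) s3) s2 =
        (PySem.List.pyRange 0 ((B.length : Int)) 1).foldl (fun s3 c =>
          if a ≤ b ∧ b ≤ c then
            (PySem.List.pyRange c ((B.length : Int)) 1).foldl (fun s4 d =>
              (PySem.List.pyRange d ((B.length : Int)) 1).foldl (fun s5 e =>
                updA s5 (phi B (PySem.List.pyGetD A 0 0) a (phi B (PySem.List.pyGetD A 1 0) b
                  (phi B (PySem.List.pyGetD A 2 0) c (phi B (PySem.List.pyGetD A 3 0) d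
                    (phi B (PySem.List.pyGetD A 4 0) e (0, []))))))) s4) s3
          else s3) s2 := by
      apply PySem.List.foldl_congr_mem
      intro s3 c hc
      obtain ⟨hc0, -⟩ := (PySem.List.mem_pyRange_one).mp hc
      have e2 : (PySem.List.pyRange 0 ((B.length : Int)) 1).foldl (fun s4 d =>
          (PySem.List.pyRange 0 ((B.length : Int)) 1).foldl (fun s5 e =>
            if a ≤ b ∧ b ≤ c ∧ c ≤ d ∧ d ≤ e then
              updA s5 (phi B (PySem.List.pyGetD A 0 0) a (phi B (PySem.List.pyGetD A 1 0) b
                (phi B (PySem.List.pyGetD A 2 0) c (phi B (PySem.List.pyGetD A 3 0) d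
                  (phi B (PySem.List.pyGetD A 4 0) e (0, []))))))
            else s5) s4) s3 =
          (PySem.List.pyRange 0 ((B.length : Int)) 1).foldl (fun s4 d =>
            if a ≤ b ∧ b ≤ c ∧ c ≤ d then
              (PySem.List.pyRange d ((B.length : Int)) 1).foldl (fun s5 e =>
                updA s5 (phi B (PySem.List.pyGetD A 0 0) a (phi B (PySem.List.pyGetD A 1 0) b
                  (phi B (PySem.List.pyGetD A 2 0) c (phi B (PySem.List.pyGetD A 3 0) d
                    (phi B (PySem.List.pyGetD A 4 0) e (0, []))))))) s4
            else s4) s3 := by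
        apply PySem.List.foldl_congr_mem
        intro s4 d hd
        obtain ⟨hd0, -⟩ := (PySem.List.mem_pyRange_one).mp hd
        exact trE b c d hd0 s4
      rw [e2, trD b c hc0 s3]
    rw [e1, trC b hb0 s2]
  rw [inner, levelGen (fun b => a ≤ b) True a _ ha0 (fun b => by tauto) _ s1, if_pos trivial]
  rfl
theorem A_side (A B : List Int) (hB : 1 ≤ B.length) :
    brutal_distance A B =
      (mcost B [PySem.List.pyGetD A 0 0, PySem.List.pyGetD A 1 0, PySem.List.pyGetD A 2 0,
         PySem.List.pyGetD A 3 0, PySem.List.pyGetD A 4 0] 0,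
       tup B [PySem.List.pyGetD A 0 0, PySem.List.pyGetD A 1 0, PySem.List.pyGetD A 2 0,
         PySem.List.pyGetD A 3 0, PySem.List.pyGetD A 4 0] 0) := by
  have hbd : brutal_distance A B =
      ((stA A B).1.getD 0,
       (PySem.List.pyGet? (stA A B).2 (((stA A B).2.length : Int) - 1)).getD []) := rfl
  have h0B : (0 : Int) < (B.length : Int) := by exact_mod_cast hB
  have hF := F_eq_some B [PySem.List.pyGetD A 0 0, PySem.List.pyGetD A 1 0,
    PySem.List.pyGetD A 2 0, PySem.List.pyGetD A 3 0, PySem.List.pyGetD A 4 0] 0 h0B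
  have hst : stA A B = (CL B [PySem.List.pyGetD A 0 0, PySem.List.pyGetD A 1 0,
      PySem.List.pyGetD A 2 0, PySem.List.pyGetD A 3 0, PySem.List.pyGetD A 4 0] 0).foldl updA
      ((none : Option Int), ([] : List (List Int))) := by
    rw [A_nested]
    exact (foldA_CL B _ 0 id ((none : Option Int), [])).symm
  have hrel : RelA (stA A B) (F B [PySem.List.pyGetD A 0 0, PySem.List.pyGetD A 1 0,
      PySem.List.pyGetD A 2 0, PySem.List.pyGetD A 3 0, PySem.List.pyGetD A 4 0] 0) := by
    rw [hst]
    exact RelA_fold _ _ none ⟨rfl, rfl⟩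
  obtain ⟨hfst, hsnd⟩ := hrel
  rw [hF] at hfst hsnd
  simp only [Option.map_some] at hfst hsnd
  have hne : (stA A B).2 ≠ [] := by
    intro h
    rw [h] at hsnd
    simp at hsnd
  have hlen : 1 ≤ (stA A B).2.length := List.length_pos_of_ne_nil hne
  have hcast : ((stA A B).2.length : Int) - 1 = (((stA A B).2.length - 1 : Nat) : Int) := by
    push_cast [hlen]
    omega
  rw [hbd, hfst, hcast, PySem.List.pyGet?_natCast, ← List.getLast?_eq_getElem?, hsnd]
  rfl

theorem build_step (B vs : List Int) (v : Int) :
    (sufRun ((B.zip (layerFrom B vs 0)).map (fun p => |v - p.1| + p.2))).1.reverse =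
      layerFrom B (v :: vs) 0 := by
  rw [sufRun_rev]
  have h := layer_step B vs v B.length 0 (by omega)
  simpa using h

theorem tup_nil (B : List Int) (c : Int) : tup B [] c = [] := rfl

theorem B_side (a0 a1 a2 a3 a4 : Int) (Ar B : List Int) (hB : 1 ≤ B.length) :
    brutal_distance_alt (a0 :: a1 :: a2 :: a3 :: a4 :: Ar) B =
      (mcost B [a0, a1, a2, a3, a4] 0, tup B [a0, a1, a2, a3, a4] 0) := by
  have h0B : (0 : Int) < (B.length : Int) := by exact_mod_cast hB
  have hsl : PySem.List.slice (a0 :: a1 :: a2 :: a3 :: a4 :: Ar) none (some (5 : Int)) =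
      [a0, a1, a2, a3, a4] := by
    rw [PySem.List.slice_to (a0 :: a1 :: a2 :: a3 :: a4 :: Ar) (b := 5) (by norm_num)]
    rfl
  have hrev : ([a0, a1, a2, a3, a4] : List Int).reverse = [a4, a3, a2, a1, a0] := rfl
  have hrep : List.replicate B.length (0 : Int) = layerFrom B [] 0 := by
    rw [layerFrom_nil B 0]
    norm_num
  have hlayers :
      ((PySem.List.slice (a0 :: a1 :: a2 :: a3 :: a4 :: Ar) none (some (5 : Int))).reverse).foldl
        (fun ls v =>
          ((sufRun ((B.zip (PySem.List.pyGetD ls 0 ([] : List Int))).map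
            (fun p => |v - p.1| + p.2))).1.reverse) :: ls)
        [List.replicate B.length 0] =
      [layerFrom B [a0, a1, a2, a3, a4] 0, layerFrom B [a1, a2, a3, a4] 0,
       layerFrom B [a2, a3, a4] 0, layerFrom B [a3, a4] 0, layerFrom B [a4] 0,
       layerFrom B [] 0] := by
    rw [hsl, hrev, hrep]
    simp only [List.foldl_cons, List.foldl_nil, PySem.List.pyGetD_ofNat', List.getD_cons_zero,
      build_step]
  have hr5 : PySem.List.pyRange 0 5 1 = [0, 1, 2, 3, 4] := by decide
  -- the five greedy walks
  obtain ⟨w00, w01, w02, w03⟩ := walkW_spec B [a1, a2, a3, a4] a0 (B.length + 1) 0 le_rfl h0B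
    (by push_cast; omega)
  set t0 := walkW a0 B (layerFrom B [a1, a2, a3, a4] 0) (layerFrom B [a0, a1, a2, a3, a4] 0)
    (B.length + 1) 0 with ht0
  obtain ⟨w10, w11, w12, w13⟩ := walkW_spec B [a2, a3, a4] a1 (B.length + 1) t0 w00 w02
    (by push_cast; omega)
  set t1 := walkW a1 B (layerFrom B [a2, a3, a4] 0) (layerFrom B [a1, a2, a3, a4] 0)
    (B.length + 1) t0 with ht1
  obtain ⟨w20, w21, w22, w23⟩ := walkW_spec B [a3, a4] a2 (B.length + 1) t1 w10 w12
    (by push_cast; omega)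
  set t2 := walkW a2 B (layerFrom B [a3, a4] 0) (layerFrom B [a2, a3, a4] 0)
    (B.length + 1) t1 with ht2
  obtain ⟨w30, w31, w32, w33⟩ := walkW_spec B [a4] a3 (B.length + 1) t2 w20 w22
    (by push_cast; omega)
  set t3 := walkW a3 B (layerFrom B [a4] 0) (layerFrom B [a3, a4] 0)
    (B.length + 1) t2 with ht3
  obtain ⟨w40, w41, w42, w43⟩ := walkW_spec B [] a4 (B.length + 1) t3 w30 w32
    (by push_cast; omega)
  set t4 := walkW a4 B (layerFrom B [] 0) (layerFrom B [a4] 0)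
    (B.length + 1) t3 with ht4
  have htup : tup B [a0, a1, a2, a3, a4] 0 = [t0, t1, t2, t3, t4] := by
    rw [w03, w13, w23, w33, w43, tup_nil]
  have hfst : (layerFrom B [a0, a1, a2, a3, a4] 0)[0]?.getD 0 =
      mcost B [a0, a1, a2, a3, a4] 0 := by
    rw [← List.getD_eq_getElem?_getD, layerFrom_getD B [a0, a1, a2, a3, a4] 0 0 (by omega)]
    norm_num
  show (PySem.List.pyGetD (PySem.List.pyGetD
      (((PySem.List.slice (a0 :: a1 :: a2 :: a3 :: a4 :: Ar) none (some (5 : Int))).reverse).foldl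
        (fun ls v =>
          ((sufRun ((B.zip (PySem.List.pyGetD ls 0 ([] : List Int))).map
            (fun p => |v - p.1| + p.2))).1.reverse) :: ls)
        [List.replicate B.length 0]) 0 ([] : List Int)) 0 0,
    ((PySem.List.pyRange 0 5 1).foldl (fun (st : Int × List Int) k =>
      ((walkW (PySem.List.pyGetD (a0 :: a1 :: a2 :: a3 :: a4 :: Ar) k 0) B
          (PySem.List.pyGetD
            (((PySem.List.slice (a0 :: a1 :: a2 :: a3 :: a4 :: Ar) none (some (5 : Int))).reverse).foldl
              (fun ls v =>
                ((sufRun ((B.zip (PySem.List.pyGetD ls 0 ([] : List Int))).map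
                  (fun p => |v - p.1| + p.2))).1.reverse) :: ls)
              [List.replicate B.length 0]) (k + 1) ([] : List Int))
          (PySem.List.pyGetD
            (((PySem.List.slice (a0 :: a1 :: a2 :: a3 :: a4 :: Ar) none (some (5 : Int))).reverse).foldl
              (fun ls v =>
                ((sufRun ((B.zip (PySem.List.pyGetD ls 0 ([] : List Int))).map
                  (fun p => |v - p.1| + p.2))).1.reverse) :: ls)
              [List.replicate B.length 0]) k ([] : List Int))
          (B.length + 1) st.1),
        st.2 ++ [walkW (PySem.List.pyGetD (a0 :: a1 :: a2 :: a3 :: a4 :: Ar) k 0) B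
          (PySem.List.pyGetD
            (((PySem.List.slice (a0 :: a1 :: a2 :: a3 :: a4 :: Ar) none (some (5 : Int))).reverse).foldl
              (fun ls v =>
                ((sufRun ((B.zip (PySem.List.pyGetD ls 0 ([] : List Int))).map
                  (fun p => |v - p.1| + p.2))).1.reverse) :: ls)
              [List.replicate B.length 0]) (k + 1) ([] : List Int))
          (PySem.List.pyGetD
            (((PySem.List.slice (a0 :: a1 :: a2 :: a3 :: a4 :: Ar) none (some (5 : Int))).reverse).foldl
              (fun ls v =>
                ((sufRun ((B.zip (PySem.List.pyGetD ls 0 ([] : List Int))).map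
                  (fun p => |v - p.1| + p.2))).1.reverse) :: ls)
              [List.replicate B.length 0]) k ([] : List Int))
          (B.length + 1) st.1])) ((0 : Int), ([] : List Int))).2) =
    (mcost B [a0, a1, a2, a3, a4] 0, tup B [a0, a1, a2, a3, a4] 0)
  rw [hlayers, hr5]
  simp only [List.foldl_cons, List.foldl_nil]
  norm_num [PySem.List.pyGetD_ofNat', List.getD_cons_zero, List.getD_cons_succ]
  refine ⟨hfst, ?_⟩
  rw [htup]

-- ===== VERDICT (by name: the statement is the Claim_ definition above) =====
theorem brutal_distance_spec : Claim_equal_brutal_distance := by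
  unfold Claim_equal_brutal_distance
  intro A B _hDom hPre
  obtain ⟨h5, h1⟩ := hPre
  unfold Spec_brutal_distance
  rcases A with _ | ⟨a0, A⟩
  · simp at h5
  rcases A with _ | ⟨a1, A⟩
  · simp at h5
  rcases A with _ | ⟨a2, A⟩
  · simp at h5
  rcases A with _ | ⟨a3, A⟩
  · simp at h5
  rcases A with _ | ⟨a4, A⟩
  · simp at h5
  have e0 : PySem.List.pyGetD (a0 :: a1 :: a2 :: a3 :: a4 :: A) (0 : Int) (0 : Int) = a0 := by simp [pysem]
  have e1 : PySem.List.pyGetD (a0 :: a1 :: a2 :: a3 :: a4 :: A) (1 : Int) (0 : Int) = a1 := by simp [pysem]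
  have e2 : PySem.List.pyGetD (a0 :: a1 :: a2 :: a3 :: a4 :: A) (2 : Int) (0 : Int) = a2 := by simp [pysem]
  have e3 : PySem.List.pyGetD (a0 :: a1 :: a2 :: a3 :: a4 :: A) (3 : Int) (0 : Int) = a3 := by simp [pysem]
  have e4 : PySem.List.pyGetD (a0 :: a1 :: a2 :: a3 :: a4 :: A) (4 : Int) (0 : Int) = a4 := by simp [pysem]
  rw [A_side _ B h1, e0, e1, e2, e3, e4, B_side a0 a1 a2 a3 a4 A B h1]
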